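-- pv_equiv track=rewrite | github.com/deimosap/ANTLR-based-OOL-compiler | myoosListener.py | helper_function_change
-- ===== SOURCE A (Python) =====
-- def helper_function_change(replacements, target_string):
-- 	current_index = 0
-- 	for old, new in replacements:
-- 		## find the first instance of the substring to replace after the current index
-- 		index = target_string.find(old, current_index)
-- 		if index != -1:
-- 			## perform the replacement at the first instance
-- 			target_string = target_string[:index] + new + target_string[index + len(old):]
-- 			## update the index to move past the replaced part
-- 			current_index = index + len(new)
-- 	return target_string
-- ===== SOURCE B (Python) =====
-- def helper_function_change(replacements, target_string):
--     # Scan the immutable original string with a read pointer instead of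
--     # rebuilding the string after every replacement.
--     pos = 0
--     out = []
--     for old, new in replacements:
--         index = target_string.find(old, pos)
--         if index != -1:
--             out.append(target_string[pos:index])
--             out.append(new)
--             pos = index + len(old)
--     out.append(target_string[pos:])
--     return ''.join(out)
-- ===== Notes on version B (the rewrite author's own statement) =====
-- stated objective: faster
-- what changed: B never rebuilds the string: it keeps target_string immutable, moves a read pointer through it with find(old, pos), collects output pieces in a list and joins once at the end, instead of A's slice-and-concatenate reconstruction of the whole string on every replacement.
import Mathlib
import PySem

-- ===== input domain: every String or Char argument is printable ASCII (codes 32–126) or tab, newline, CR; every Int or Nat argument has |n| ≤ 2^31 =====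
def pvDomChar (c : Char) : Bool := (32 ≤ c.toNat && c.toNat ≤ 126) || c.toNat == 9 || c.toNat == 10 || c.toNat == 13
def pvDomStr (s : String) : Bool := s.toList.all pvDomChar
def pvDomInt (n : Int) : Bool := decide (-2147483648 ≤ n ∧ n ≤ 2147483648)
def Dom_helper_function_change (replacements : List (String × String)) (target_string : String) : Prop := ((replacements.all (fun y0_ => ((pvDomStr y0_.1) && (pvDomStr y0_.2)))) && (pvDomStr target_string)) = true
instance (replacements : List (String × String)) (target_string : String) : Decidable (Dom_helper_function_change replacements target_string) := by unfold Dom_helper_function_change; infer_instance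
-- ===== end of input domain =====

-- B avoids A's repeated slice-and-concatenate rebuild of the string: it scans the immutable
-- original with a moving read pointer and joins the collected pieces once at the end.


-- ===== PORT A =====
-- loop state: (current target_string as code points, current_index)
def pvStepA (st : List Char × Int) (p : String × String) : List Char × Int :=
  let index := PySem.Chars.findFrom st.1 p.1.toList st.2
  if index ≠ -1 then
    (PySem.List.slice st.1 none (some index) ++ p.2.toList
       ++ PySem.List.slice st.1 (some (index + (p.1.toList.length : Int))) none,
     index + (p.2.toList.length : Int))
  else st

def helper_function_change (replacements : List (String × String)) (target_string : String) : String :=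
  String.ofList (replacements.foldl pvStepA (target_string.toList, 0)).1

-- ===== PORT B =====
-- loop state: (list of output pieces, read pointer pos into the unchanged original)
def pvStepB (t : List Char) (st : List (List Char) × Int) (p : String × String) : List (List Char) × Int :=
  let index := PySem.Chars.findFrom t p.1.toList st.2
  if index ≠ -1 then
    (st.1 ++ [PySem.List.slice t (some st.2) (some index), p.2.toList],
     index + (p.1.toList.length : Int))
  else st

def helper_function_change_alt (replacements : List (String × String)) (target_string : String) : String :=
  match replacements.foldl (pvStepB target_string.toList) ([], 0) with
  | (out, pos) =>
    String.ofList (PySem.Chars.join [] (out ++ [PySem.List.slice target_string.toList (some pos) none]))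

-- ===== PRECONDITION & SPEC =====
def Spec_helper_function_change (replacements : List (String × String)) (target_string : String) (out : String) : Prop := out = helper_function_change_alt replacements target_string
instance (replacements : List (String × String)) (target_string : String) (out : String) : Decidable (Spec_helper_function_change replacements target_string out) := by unfold Spec_helper_function_change; infer_instance

-- ===== CLAIM (what is proved, stated in full; the proofs are below) =====
def Claim_equal_helper_function_change : Prop := ∀ (replacements : List (String × String)) (target_string : String), Dom_helper_function_change replacements target_string → Spec_helper_function_change replacements target_string (helper_function_change replacements target_string)

-- ===== LEMMAS AND PROOFS =====

theorem pv_join_nil (p : List (List Char)) : PySem.Chars.join [] p = p.flatten := by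
  simp only [PySem.Chars.join, List.intercalate]
  induction p with
  | nil => rfl
  | cons a t ih =>
    cases t with
    | nil => simp
    | cons b u => simpa [List.intersperse] using ih

-- Loop invariant: A's state is (joined pieces so far ++ untouched suffix of the original,
-- length of the joined pieces); B's state is (the pieces, the read pointer).
theorem pv_loop (orig : List Char) (reps : List (String × String)) :
    ∀ (acc : List (List Char)) (pos : Nat), pos ≤ orig.length →
    ∃ (acc' : List (List Char)) (pos' : Nat),
      reps.foldl (pvStepB orig) (acc, (pos : Int)) = (acc', (pos' : Int)) ∧
      pos' ≤ orig.length ∧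
      reps.foldl pvStepA (acc.flatten ++ orig.drop pos, (acc.flatten.length : Int))
        = (acc'.flatten ++ orig.drop pos', (acc'.flatten.length : Int)) := by
  induction reps with
  | nil =>
    intro acc pos hpos
    exact ⟨acc, pos, rfl, hpos, rfl⟩
  | cons p t ih =>
    intro acc pos hpos
    obtain ⟨old, new⟩ := p
    simp only [List.foldl_cons]
    set F := acc.flatten with hF
    set D := orig.drop pos with hD
    have hDlen : D.length = orig.length - pos := by rw [hD, List.length_drop]
    have hkA : F.length ≤ (F ++ D).length := by simp
    have hfA : PySem.Chars.findFrom (F ++ D) old.toList (F.length : Int)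
        = if PySem.Chars.find D old.toList = -1 then -1
          else (F.length : Int) + PySem.Chars.find D old.toList := by
      rw [PySem.Chars.findFrom_natCast _ _ _ hkA, List.drop_left]
    have hfB : PySem.Chars.findFrom orig old.toList (pos : Int)
        = if PySem.Chars.find D old.toList = -1 then -1
          else (pos : Int) + PySem.Chars.find D old.toList := by
      rw [PySem.Chars.findFrom_natCast _ _ _ hpos, hD]
    by_cases h : PySem.Chars.find D old.toList = -1
    · -- no occurrence: both states unchanged
      have hA : pvStepA (F ++ D, (F.length : Int)) (old, new) = (F ++ D, (F.length : Int)) := by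
        simp [pvStepA, hfA, h]
      have hB : pvStepB orig (acc, (pos : Int)) (old, new) = (acc, (pos : Int)) := by
        simp [pvStepB, hfB, h]
      rw [hA, hB]
      exact ih acc pos hpos
    · -- occurrence at offset n inside the untouched suffix D
      have hge : 0 ≤ PySem.Chars.find D old.toList := by
        have := PySem.Chars.neg_one_le_find D old.toList
        omega
      set n := (PySem.Chars.find D old.toList).toNat with hn
      have hfn : PySem.Chars.find D old.toList = (n : Int) := by omega
      have hnD : n ≤ D.length := by
        have := PySem.Chars.find_le_length D old.toList
        omega
      have hpre : old.toList <+: D.drop n := (PySem.Chars.find_spec hge).1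
      have holD : n + old.toList.length ≤ D.length := by
        have := hpre.length_le
        rw [List.length_drop] at this
        omega
      have hpos' : pos + n + old.toList.length ≤ orig.length := by omega
      -- A's step
      have hA : pvStepA (F ++ D, (F.length : Int)) (old, new)
          = ((acc ++ [D.take n, new.toList]).flatten ++ orig.drop (pos + n + old.toList.length),
             ((acc ++ [D.take n, new.toList]).flatten.length : Int)) := by
        simp only [pvStepA]
        rw [hfA, if_neg h, hfn]
        have hne : (F.length : Int) + (n : Int) ≠ -1 := by omega
        rw [if_pos hne]
        have e2 : (F.length : Int) + (n : Int) + (old.toList.length : Int)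
            = ((F.length + n + old.toList.length : Nat) : Int) := by push_cast; ring
        have e1 : (F.length : Int) + (n : Int) = ((F.length + n : Nat) : Int) := by push_cast; ring
        rw [e2, e1, PySem.List.slice_to_natCast, PySem.List.slice_from_natCast]
        have t1 : (F ++ D).take (F.length + n) = F ++ D.take n := by
          rw [List.take_append, List.take_of_length_le (by omega)]
          congr 2
          omega
        have t2 : (F ++ D).drop (F.length + n + old.toList.length)
            = orig.drop (pos + n + old.toList.length) := by
          rw [List.drop_append, List.drop_eq_nil_of_le (by omega), List.nil_append, hD,
            List.drop_drop]
          congr 1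
          omega
        rw [Prod.mk.injEq]
        constructor
        · rw [t1, t2]
          simp only [List.flatten_append, List.flatten_cons, List.flatten_nil,
            List.append_nil, ← hF, List.append_assoc]
        · have : (acc ++ [D.take n, new.toList]).flatten.length
              = F.length + n + new.toList.length := by
            simp only [List.flatten_append, List.flatten_cons, List.flatten_nil,
              List.append_nil, List.length_append, List.length_take, ← hF]
            omega
          rw [this]
          push_cast
          ring
      -- B's step
      have hB : pvStepB orig (acc, (pos : Int)) (old, new)
          = (acc ++ [D.take n, new.toList], ((pos + n + old.toList.length : Nat) : Int)) := by
        simp only [pvStepB]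
        rw [hfB, if_neg h, hfn]
        have hne : (pos : Int) + (n : Int) ≠ -1 := by omega
        rw [if_pos hne, PySem.List.slice_natCast_add orig pos n, ← hD, Prod.mk.injEq]
        constructor
        · rfl
        · push_cast
          ring
      rw [hA, hB]
      exact ih (acc ++ [D.take n, new.toList]) (pos + n + old.toList.length) hpos'

-- ===== VERDICT (by name: the statement is the Claim_ definition above) =====
theorem helper_function_change_spec : Claim_equal_helper_function_change := by
  intro reps t _
  unfold Spec_helper_function_change helper_function_change helper_function_change_alt
  obtain ⟨acc', pos', hB, hpos', hA⟩ := pv_loop t.toList reps [] 0 (Nat.zero_le _)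
  simp only [List.flatten_nil, List.nil_append, List.drop_zero, List.length_nil,
    Nat.cast_zero] at hA hB
  rw [hA, hB]
  simp only [PySem.List.slice_from_natCast, pv_join_nil, List.flatten_append,
    List.flatten_cons, List.flatten_nil, List.append_nil]
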